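-- pv_equiv track=rewrite | github.com/BitDanceLabels/search | folder-gateway-skill/openapi_tools/openapi_utils.py | split_parameters
-- ===== SOURCE A (Python) =====
-- from typing import Any, Dict, Iterable, List, Tuple
--
-- def split_parameters(params: Iterable[dict]) -> Tuple[List[dict], List[dict], List[dict]]:
--     path_params: list[dict] = []
--     query_params: list[dict] = []
--     header_params: list[dict] = []
--     for p in params:
--         if not isinstance(p, dict):
--             continue
--         location = p.get("in")
--         if location == "path":
--             path_params.append(p)
--         elif location == "header":
--             header_params.append(p)
--         else:
--             query_params.append(p)
--     return path_params, query_params, header_params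
-- ===== SOURCE B (Python) =====
-- def split_parameters(params):
--     items = [p for p in params if isinstance(p, dict)]
--     path_params = [p for p in items if p.get("in") == "path"]
--     header_params = [p for p in items if p.get("in") == "header"]
--     query_params = [p for p in items if p.get("in") not in ("path", "header")]
--     return path_params, query_params, header_params
-- ===== Notes on version B (the rewrite author's own statement) =====
-- stated objective: idiomatic
-- what changed: Replaces the single accumulating loop with one materializing pass plus three independent filtering comprehensions, one per bucket.
import Mathlib
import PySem

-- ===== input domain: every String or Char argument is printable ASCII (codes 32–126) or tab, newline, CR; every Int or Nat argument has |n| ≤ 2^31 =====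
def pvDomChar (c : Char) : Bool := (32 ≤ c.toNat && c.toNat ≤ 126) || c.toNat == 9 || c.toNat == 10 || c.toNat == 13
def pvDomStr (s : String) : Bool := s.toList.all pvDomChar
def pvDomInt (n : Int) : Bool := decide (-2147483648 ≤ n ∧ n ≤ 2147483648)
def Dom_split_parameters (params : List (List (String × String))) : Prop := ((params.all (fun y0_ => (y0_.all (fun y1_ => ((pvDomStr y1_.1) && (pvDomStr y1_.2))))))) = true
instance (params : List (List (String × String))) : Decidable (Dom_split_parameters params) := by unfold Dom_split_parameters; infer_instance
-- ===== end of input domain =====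

-- B replaces A's single accumulating loop with three independent filtering passes (idiomatic; same cost).

-- ===== PORT A =====
-- A: one pass over params, appending each dict to the bucket chosen by p.get("in").
-- (In the Lean model every element is a dict, so A's `isinstance` guard is vacuous.)
def split_parameters (params : List (List (String × String))) : (List (List (String × String))) × (List (List (String × String))) × (List (List (String × String))) :=
  let r := params.foldl
    (fun (acc : List (List (String × String)) × List (List (String × String)) × List (List (String × String))) p =>
      let (pathP, queryP, headerP) := acc
      let location := (PySem.Dict.mk p).get? "in"
      if location = some "path" then (pathP ++ [p], queryP, headerP)
      else if location = some "header" then (pathP, queryP, headerP ++ [p])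
      else (pathP, queryP ++ [p], headerP))
    ([], [], [])
  r

-- ===== PORT B =====
def split_parameters_alt (params : List (List (String × String))) : (List (List (String × String))) × (List (List (String × String))) × (List (List (String × String))) :=
  let items := params
  let pathP := items.filter (fun p => (PySem.Dict.mk p).get? "in" == some "path")
  let headerP := items.filter (fun p => (PySem.Dict.mk p).get? "in" == some "header")
  let queryP := items.filter (fun p =>
    !((PySem.Dict.mk p).get? "in" == some "path") && !((PySem.Dict.mk p).get? "in" == some "header"))
  (pathP, queryP, headerP)

-- ===== PRECONDITION & SPEC =====
def Spec_split_parameters (params : List (List (String × String))) (out : (List (List (String × String))) × (List (List (String × String))) × (List (List (String × String)))) : Prop := out = split_parameters_alt params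
instance (params : List (List (String × String))) (out : (List (List (String × String))) × (List (List (String × String))) × (List (List (String × String)))) : Decidable (Spec_split_parameters params out) := by unfold Spec_split_parameters; infer_instance

-- ===== CLAIM (what is proved, stated in full; the proofs are below) =====
def Claim_equal_split_parameters : Prop := ∀ (params : List (List (String × String))), Dom_split_parameters params → Spec_split_parameters params (split_parameters params)

-- ===== LEMMAS AND PROOFS =====

-- A's fold started from arbitrary accumulators appends exactly B's three filters.
theorem split_parameters_foldl_eq (params : List (List (String × String)))
    (pa qa ha : List (List (String × String))) :
    params.foldl
      (fun (acc : List (List (String × String)) × List (List (String × String)) × List (List (String × String))) p =>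
        let (pathP, queryP, headerP) := acc
        let location := (PySem.Dict.mk p).get? "in"
        if location = some "path" then (pathP ++ [p], queryP, headerP)
        else if location = some "header" then (pathP, queryP, headerP ++ [p])
        else (pathP, queryP ++ [p], headerP))
      (pa, qa, ha)
    = (pa ++ params.filter (fun p => (PySem.Dict.mk p).get? "in" == some "path"),
       qa ++ params.filter (fun p =>
         !((PySem.Dict.mk p).get? "in" == some "path") && !((PySem.Dict.mk p).get? "in" == some "header")),
       ha ++ params.filter (fun p => (PySem.Dict.mk p).get? "in" == some "header")) := by
  induction params generalizing pa qa ha with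
  | nil => simp
  | cons p rest ih =>
    simp only [List.foldl_cons, List.filter_cons]
    by_cases hp : (PySem.Dict.mk p).get? "in" = some "path"
    · simp [hp, ih]
    · by_cases hh : (PySem.Dict.mk p).get? "in" = some "header"
      · simp [hh, ih]
      · simp [hp, hh, ih]

-- ===== VERDICT (by name: the statement is the Claim_ definition above) =====
theorem split_parameters_spec : Claim_equal_split_parameters := by
  intro params _
  show split_parameters params = split_parameters_alt params
  simp [split_parameters, split_parameters_alt, split_parameters_foldl_eq]
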